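-- pv_equiv track=rewrite | github.com/ehdrb5011992/Python | Self_study/2020_Winter/2. Algorithms with Python/파이썬 알고리즘 문제 및 채점/섹션3. 탐색과 시뮬레이션/7. 사과나무/AA.py | apple_tree
-- ===== SOURCE A (Python) =====
-- def apple_tree(x,N):
--
--     dx=0
--     tot=0
--     st= N//2
--     for i in range(N):
--         tot += sum(x[i][(st-dx):(st+dx+1)])
--         if i < (N-1)//2:
--             dx+=1
--         else:
--             dx-=1
--     return(tot)
-- ===== SOURCE B (Python) =====
-- def apple_tree(x, N):
--     peak = (N - 1) // 2
--     st = N // 2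
--     tot = 0
--     for i in range(N):
--         for j, v in enumerate(x[i]):
--             if abs(i - peak) + abs(j - st) <= peak:
--                 tot += v
--     return tot
-- ===== Notes on version B (the rewrite author's own statement) =====
-- stated objective: alternative
-- what changed: B replaces A's stateful expanding/contracting half-width dx and per-row slicing with a closed geometric predicate: it scans every cell (i,j) of the first N rows and adds x[i][j] exactly when abs(i-peak)+abs(j-st)<=peak, maintaining no loop-carried width state.
import Mathlib
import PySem

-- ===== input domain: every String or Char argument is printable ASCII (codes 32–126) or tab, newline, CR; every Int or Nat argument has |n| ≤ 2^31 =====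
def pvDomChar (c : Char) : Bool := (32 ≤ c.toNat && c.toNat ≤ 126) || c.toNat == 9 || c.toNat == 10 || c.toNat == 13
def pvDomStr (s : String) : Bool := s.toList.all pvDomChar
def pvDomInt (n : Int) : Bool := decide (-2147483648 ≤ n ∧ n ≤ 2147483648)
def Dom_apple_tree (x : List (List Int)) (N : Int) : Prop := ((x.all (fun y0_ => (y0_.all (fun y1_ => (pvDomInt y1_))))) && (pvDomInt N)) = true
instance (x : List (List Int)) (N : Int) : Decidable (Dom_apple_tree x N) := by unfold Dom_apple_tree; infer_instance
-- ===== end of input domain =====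

-- B replaces A's stateful expanding/contracting half-width with a closed Manhattan-distance
-- membership test per cell; same asymptotic cost, no loop-carried width state.

-- ===== PORT A =====
-- literal port of A: state (dx, tot), slice each row x[i][st-dx : st+dx+1]
def apple_tree (x : List (List Int)) (N : Int) : Int :=
  let st := PySem.Int.floordiv N 2
  (((PySem.List.pyRange 0 N 1).foldl
      (fun (s : Int × Int) i =>
        let tot := s.2 + (PySem.List.slice (PySem.List.pyGetD x i [])
                            (some (st - s.1)) (some (st + s.1 + 1))).sum
        if i < PySem.Int.floordiv (N - 1) 2 then (s.1 + 1, tot) else (s.1 - 1, tot))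
      (0, 0))).2

-- ===== PORT B =====
-- literal port of B: for each i < N, for each (j, v) in enumerate(x[i]),
-- add v when |i - peak| + |j - st| ≤ peak
def apple_tree_alt (x : List (List Int)) (N : Int) : Int :=
  let peak := PySem.Int.floordiv (N - 1) 2
  let st := PySem.Int.floordiv N 2
  (PySem.List.pyRange 0 N 1).foldl
    (fun tot i =>
      (PySem.List.enumerate (PySem.List.pyGetD x i [])).foldl
        (fun t jv => if |i - peak| + |jv.1 - st| ≤ peak then t + jv.2 else t) tot)
    0

-- ===== PRECONDITION & SPEC =====
-- Pre_ excludes exactly the inputs where Python A raises IndexError (x has fewer than N rows);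
-- B indexes x[i] the same way and raises there too.
def Pre_apple_tree (x : List (List Int)) (N : Int) : Prop := N ≤ (x.length : Int)
instance (x : List (List Int)) (N : Int) : Decidable (Pre_apple_tree x N) := by
  unfold Pre_apple_tree; infer_instance

def pvWitness_apple_tree : List (List Int) × Int := ([[1, 2, 3], [4, 5, 6], [7, 8, 9]], 3)

def Spec_apple_tree (x : List (List Int)) (N : Int) (out : Int) : Prop := out = apple_tree_alt x N
instance (x : List (List Int)) (N : Int) (out : Int) : Decidable (Spec_apple_tree x N out) := by
  unfold Spec_apple_tree; infer_instance

-- ===== CLAIM (what is proved, stated in full; the proofs are below) =====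
def Claim_equal_apple_tree : Prop :=
  ∀ (x : List (List Int)) (N : Int), Dom_apple_tree x N → Pre_apple_tree x N →
    Spec_apple_tree x N (apple_tree x N)

-- ===== LEMMAS AND PROOFS =====

-- every index produced by enumerate is at least the start value
theorem pv_enum_fst_le {α : Type} (row : List α) (s : Int) :
    ∀ jv ∈ PySem.List.enumerate row s, s ≤ jv.1 := by
  induction row generalizing s with
  | nil => simp [PySem.List.enumerate_nil]
  | cons v rest ih =>
    intro jv hjv
    rw [PySem.List.enumerate_cons] at hjv
    rcases List.mem_cons.mp hjv with h | h
    · simp [h]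
    · have := ih (s + 1) jv h; omega

-- shifting the start of enumerate shifts every index
theorem pv_enum_shift {α : Type} (row : List α) (s : Int) :
    PySem.List.enumerate row s
      = (PySem.List.enumerate row 0).map (fun jv => (jv.1 + s, jv.2)) := by
  induction row generalizing s with
  | nil => simp [PySem.List.enumerate_nil]
  | cons v rest ih =>
    rw [PySem.List.enumerate_cons, PySem.List.enumerate_cons, ih (s + 1), ih (0 + 1)]
    simp [List.map_map, Function.comp_def]
    intro a b _
    omega

-- sum of a drop/take window = sum over enumerate with an index-range test (Nat bounds)
theorem pv_window_sum (row : List Int) (a b : Nat) :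
    (List.take (b - a) (List.drop a row)).sum
      = ((PySem.List.enumerate row 0).map
          (fun jv => if (a : Int) ≤ jv.1 ∧ jv.1 < (b : Int) then jv.2 else 0)).sum := by
  induction row generalizing a b with
  | nil => simp [PySem.List.enumerate_nil]
  | cons v rest ih =>
    rw [PySem.List.enumerate_cons, pv_enum_shift rest (0 + 1)]
    simp only [List.map_cons, List.map_map, List.sum_cons, Function.comp_def, zero_add]
    have hmap : (PySem.List.enumerate rest 0).map
          (fun jv => if (a : Int) ≤ jv.1 + 1 ∧ jv.1 + 1 < (b : Int) then jv.2 else 0)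
        = (PySem.List.enumerate rest 0).map
          (fun jv => if ((a - 1 : Nat) : Int) ≤ jv.1 ∧ jv.1 < ((b - 1 : Nat) : Int) then jv.2 else 0) := by
      apply List.map_congr_left
      intro jv hjv
      have hge := pv_enum_fst_le rest 0 jv hjv
      by_cases h1 : (a : Int) ≤ jv.1 + 1 ∧ jv.1 + 1 < (b : Int)
      · rw [if_pos h1, if_pos (by omega)]
      · rw [if_neg h1, if_neg (by omega)]
    rw [hmap, ← ih (a - 1) (b - 1)]
    rcases Nat.eq_zero_or_pos a with ha | ha
    · subst ha
      rcases Nat.eq_zero_or_pos b with hb | hb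
      · subst hb; simp
      · have : b - 0 = (b - 1) + 1 := by omega
        rw [this]
        simp only [List.drop_zero, List.take_succ_cons, List.sum_cons]
        rw [if_pos (by constructor <;> omega)]
        simp
    · rw [if_neg (by omega)]
      have hd : List.drop a (v :: rest) = List.drop (a - 1) rest := by
        have : a = (a - 1) + 1 := by omega
        rw [this]; simp
      rw [hd]
      have : b - a = (b - 1) - (a - 1) := by omega
      rw [this]; omega

-- one row of B's double loop equals one slice-sum of A, for nonnegative bounds
theorem pv_inner_row (row : List Int) (peak st i t : Int)
    (ha : 0 ≤ st - (peak - |i - peak|)) (hb : 0 ≤ st + (peak - |i - peak|) + 1) :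
    (PySem.List.enumerate row 0).foldl
        (fun t jv => if |i - peak| + |jv.1 - st| ≤ peak then t + jv.2 else t) t
      = t + (PySem.List.slice row (some (st - (peak - |i - peak|)))
              (some (st + (peak - |i - peak|) + 1))).sum := by
  set d := peak - |i - peak| with hd
  rw [PySem.List.foldl_congr_mem _ _
        (fun t jv => t + (if |i - peak| + |jv.1 - st| ≤ peak then jv.2 else 0)) t
        (by intro acc jv _; by_cases h : |i - peak| + |jv.1 - st| ≤ peak <;> simp [h])]
  rw [PySem.List.foldl_add]
  rw [PySem.List.slice_toNat row ha hb]
  congr 1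
  have h1 : ((st - d).toNat : Int) = st - d := Int.toNat_of_nonneg ha
  have h2 : ((st + d + 1).toNat : Int) = st + d + 1 := Int.toNat_of_nonneg hb
  rw [pv_window_sum row (st - d).toNat (st + d + 1).toNat]
  congr 1
  apply List.map_congr_left
  intro jv _
  have habs1 : |i - peak| = ((i - peak).natAbs : Int) := Int.abs_eq_natAbs _
  have habs2 : |jv.1 - st| = ((jv.1 - st).natAbs : Int) := Int.abs_eq_natAbs _
  have hD : d = peak - ((i - peak).natAbs : Int) := by rw [hd, habs1]
  by_cases h : |i - peak| + |jv.1 - st| ≤ peak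
  · rw [if_pos h]
    rw [habs1, habs2] at h
    rw [if_pos (by rw [h1, h2]; omega)]
  · rw [if_neg h]
    rw [habs1, habs2] at h
    rw [if_neg (by rw [h1, h2]; omega)]

-- the main loop invariant: A's dx at position i is peak - |i - peak|
theorem pv_loop (x : List (List Int)) (N peak st : Int)
    (hpeak : peak = PySem.Int.floordiv (N - 1) 2) (hst : st = PySem.Int.floordiv N 2)
    (hN : 0 < N) :
    ∀ (k : Nat) (i t : Int), 0 ≤ i → i + k = N →
      (((PySem.List.pyRange i N 1).foldl
          (fun (s : Int × Int) j =>
            let tot := s.2 + (PySem.List.slice (PySem.List.pyGetD x j [])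
                                (some (st - s.1)) (some (st + s.1 + 1))).sum
            if j < PySem.Int.floordiv (N - 1) 2 then (s.1 + 1, tot) else (s.1 - 1, tot))
          (peak - |i - peak|, t))).2
        = (PySem.List.pyRange i N 1).foldl
            (fun tot j =>
              (PySem.List.enumerate (PySem.List.pyGetD x j [])).foldl
                (fun t jv => if |j - peak| + |jv.1 - st| ≤ peak then t + jv.2 else t) tot)
            t := by
  -- bracket facts about floordiv
  have hp1 : peak * 2 + PySem.Int.mod (N - 1) 2 = N - 1 := by
    rw [hpeak]; exact PySem.Int.floordiv_mul_add_mod (N - 1) 2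
  have hp2 : 0 ≤ PySem.Int.mod (N - 1) 2 := PySem.Int.mod_nonneg _ (by omega)
  have hp3 : PySem.Int.mod (N - 1) 2 < 2 := PySem.Int.mod_lt _ (by omega)
  have hs1 : st * 2 + PySem.Int.mod N 2 = N := by
    rw [hst]; exact PySem.Int.floordiv_mul_add_mod N 2
  have hs2 : 0 ≤ PySem.Int.mod N 2 := PySem.Int.mod_nonneg _ (by omega)
  have hs3 : PySem.Int.mod N 2 < 2 := PySem.Int.mod_lt _ (by omega)
  intro k
  induction k with
  | zero =>
    intro i t h0 hik
    have : i = N := by omega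
    rw [this, PySem.List.pyRange_one_eq_nil (le_refl N)]
    rfl
  | succ k ih =>
    intro i t h0 hik
    have hiN : i < N := by omega
    rw [PySem.List.pyRange_one_cons hiN]
    simp only [List.foldl_cons]
    have habs : |i - peak| = ((i - peak).natAbs : Int) := Int.abs_eq_natAbs _
    have habs' : |i + 1 - peak| = ((i + 1 - peak).natAbs : Int) := Int.abs_eq_natAbs _
    have hrow := pv_inner_row (PySem.List.pyGetD x i []) peak st i t
      (by rw [habs]; omega) (by rw [habs]; omega)
    rw [hrow]
    set t' := t + (PySem.List.slice (PySem.List.pyGetD x i [])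
        (some (st - (peak - |i - peak|))) (some (st + (peak - |i - peak|) + 1))).sum with ht'
    by_cases hcase : i < PySem.Int.floordiv (N - 1) 2
    · rw [if_pos hcase]
      rw [← hpeak] at hcase
      have hdx : peak - |i - peak| + 1 = peak - |i + 1 - peak| := by
        rw [habs, habs']; omega
      rw [hdx]
      exact ih (i + 1) t' (by omega) (by omega)
    · rw [if_neg hcase]
      rw [← hpeak] at hcase
      have hdx : peak - |i - peak| - 1 = peak - |i + 1 - peak| := by
        rw [habs, habs']; omega
      rw [hdx]
      exact ih (i + 1) t' (by omega) (by omega)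

-- ===== VERDICT (by name: the statement is the Claim_ definition above) =====
theorem apple_tree_spec : Claim_equal_apple_tree := by
  intro x N _hdom _hpre
  unfold Spec_apple_tree apple_tree apple_tree_alt
  by_cases hN : N ≤ 0
  · rw [PySem.List.pyRange_one_eq_nil hN]; rfl
  · replace hN : 0 < N := by omega
    have hp0 : 0 ≤ PySem.Int.floordiv (N - 1) 2 := by
      have h1 := PySem.Int.floordiv_mul_add_mod (N - 1) 2
      have h2 := PySem.Int.mod_nonneg (N - 1) (show (0:Int) < 2 by omega)
      have h3 := PySem.Int.mod_lt (N - 1) (show (0:Int) < 2 by omega)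
      omega
    have h0 := pv_loop x N (PySem.Int.floordiv (N - 1) 2) (PySem.Int.floordiv N 2)
      rfl rfl hN N.toNat 0 0 (le_refl 0) (by omega)
    have hz : PySem.Int.floordiv (N - 1) 2 - |0 - PySem.Int.floordiv (N - 1) 2| = 0 := by
      rw [abs_sub_comm, abs_of_nonneg (by omega)]; omega
    rw [hz] at h0
    simpa using h0
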